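-- pv_equiv track=rewrite | github.com/Harsheel12/Barcode-Scanner | barcode_scanner.py | computeDilation8Nbh5x5FlatSE
-- ===== SOURCE A (Python) =====
-- def createInitializedGreyscalePixelArray(image_width, image_height, initValue = 0):
--
--     new_array = [[initValue for x in range(image_width)] for y in range(image_height)]
--     return new_array
--
-- def CheckDilation(pixel_array, i, j):
--
--     currentValue = pixel_array[i][j]
--
--     #Scans a 5x5 area around current Pixel
--     for x in range(-2, 3):
--         for y in range(-2, 3):
--             currentValue = pixel_array[(i + x) + 1][(j + y) + 1]
--
--             if currentValue != 0:
--                 return 1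
--
--     return 0
--
-- def computeDilation8Nbh5x5FlatSE(pixel_array, image_width, image_height):
--
--     #Temporary array with the extra border
--     temp = createInitializedGreyscalePixelArray(image_width+2, image_height+2)
--
--     #Original array with border
--     arrayWithBorder = ZeroBorder(pixel_array, temp, image_width, image_height)
--
--     image = pixel_array
--
--     for i in range(1, image_height-1):
--         for j in range(1, image_width-1):
--             #Check 5x5 area around every pixel
--             image[i][j] = CheckDilation(arrayWithBorder, i, j)
--
--     return image
--
-- def ZeroBorder(original, new, image_width, image_height):
--     for row in range(image_height):
--         for col in range(image_width):
--             new[row + 1][col + 1] = original[row][col]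
--
--     return new
-- ===== SOURCE B (Python) =====
-- def computeDilation8Nbh5x5FlatSE(pixel_array, image_width, image_height):
--     W, H = image_width, image_height
--     if H < 3 or W < 3:
--         return pixel_array  # no interior pixels to write
--     # Pass 1 (horizontal): inter[i][j] = 1 iff some of row i's columns j-2..j+2
--     # (clamped to [0, W-1]) is nonzero.  any() on the slice tests truthiness.
--     inter = [[1 if any(row[max(j - 2, 0):min(j + 3, W)]) else 0 for j in range(W)]
--              for row in pixel_array[:H]]
--     # Transpose the intermediate so the vertical pass can slice columns.
--     cols = [[r[j] for r in inter] for j in range(W)]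
--     # Pass 2 (vertical): OR over rows i-2..i+2 (clamped to [0, H-1]) of inter,
--     # written into the interior pixels in place; the border stays untouched.
--     for i in range(1, H - 1):
--         for j in range(1, W - 1):
--             pixel_array[i][j] = 1 if any(cols[j][max(i - 2, 0):i + 3]) else 0
--     return pixel_array
-- ===== Notes on version B (the rewrite author's own statement) =====
-- stated objective: alternative
-- what changed: Replaces the per-pixel 25-probe scan of a freshly built zero-padded copy by a separable two-pass dilation: a horizontal 1x5 pass over clamped row slices builds an intermediate, which is transposed so a vertical 5x1 pass over clamped column slices writes the interior in place; no padded border array is allocated.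
import Mathlib
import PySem

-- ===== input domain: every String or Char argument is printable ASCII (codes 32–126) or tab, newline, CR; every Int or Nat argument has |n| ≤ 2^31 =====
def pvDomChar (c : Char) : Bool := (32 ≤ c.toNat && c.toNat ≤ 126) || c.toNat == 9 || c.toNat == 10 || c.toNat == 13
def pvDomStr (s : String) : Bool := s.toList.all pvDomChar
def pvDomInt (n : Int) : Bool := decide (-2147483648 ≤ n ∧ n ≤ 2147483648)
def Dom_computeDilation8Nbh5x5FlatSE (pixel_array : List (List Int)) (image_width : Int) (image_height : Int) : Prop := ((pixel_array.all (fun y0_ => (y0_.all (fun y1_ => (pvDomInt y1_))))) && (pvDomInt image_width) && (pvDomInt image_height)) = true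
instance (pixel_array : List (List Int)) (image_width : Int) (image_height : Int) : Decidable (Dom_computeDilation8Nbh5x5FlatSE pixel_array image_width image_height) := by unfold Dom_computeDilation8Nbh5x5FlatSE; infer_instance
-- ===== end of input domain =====

-- B replaces A's per-pixel 25-probe scan of a zero-padded copy by a separable two-pass
-- dilation (horizontal slice pass, transpose, vertical slice pass), mutating the interior
-- in place like A; the equivalence proved is about the returned value (both mutate
-- pixel_array in the same way in Python).


-- ===== PORT A =====
-- a[i][j] read with default (Python raises only outside Pre_, where nothing is claimed)
def pvGet2 (a : List (List Int)) (i j : Int) : Int :=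
  (PySem.List.pyGet? ((PySem.List.pyGet? a i).getD []) j).getD 0

-- a[i][j] = v  (indices are nonnegative and in range wherever the ports run under Pre_)
def pvSet2 (a : List (List Int)) (i j : Int) (v : Int) : List (List Int) :=
  a.set i.toNat ((a.getD i.toNat []).set j.toNat v)

-- createInitializedGreyscalePixelArray
def pvCreateInit (image_width image_height : Int) (initValue : Int) : List (List Int) :=
  (PySem.List.pyRange 0 image_height 1).map (fun _ =>
    (PySem.List.pyRange 0 image_width 1).map (fun _ => initValue))

-- CheckDilation: the early-returning 5x5 scan is the short-circuit any over both ranges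
-- (the dead initial read of pixel_array[i][j] is value-irrelevant and dropped)
def pvCheckDilation (pixel_array : List (List Int)) (i j : Int) : Int :=
  if (PySem.List.pyRange (-2) 3 1).any (fun x =>
       (PySem.List.pyRange (-2) 3 1).any (fun y =>
         pvGet2 pixel_array ((i + x) + 1) ((j + y) + 1) != 0))
  then 1 else 0

-- ZeroBorder
def pvZeroBorder (original new : List (List Int)) (image_width image_height : Int) : List (List Int) :=
  (PySem.List.pyRange 0 image_height 1).foldl (fun acc row =>
    (PySem.List.pyRange 0 image_width 1).foldl (fun acc2 col =>
      pvSet2 acc2 (row + 1) (col + 1) (pvGet2 original row col)) acc) new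

def computeDilation8Nbh5x5FlatSE (pixel_array : List (List Int)) (image_width : Int) (image_height : Int) : List (List Int) :=
  let temp := pvCreateInit (image_width + 2) (image_height + 2) 0
  let arrayWithBorder := pvZeroBorder pixel_array temp image_width image_height
  (PySem.List.pyRange 1 (image_height - 1) 1).foldl (fun image i =>
    (PySem.List.pyRange 1 (image_width - 1) 1).foldl (fun image2 j =>
      pvSet2 image2 i j (pvCheckDilation arrayWithBorder i j)) image) pixel_array

-- ===== PORT B =====
-- one row of the horizontal pass: [1 if any(row[max(j-2,0):min(j+3,W)]) else 0 for j in range(W)]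
def pvHorizRow (row : List Int) (w : Int) : List Int :=
  (PySem.List.pyRange 0 w 1).map (fun j =>
    if (PySem.List.slice row (some (max (j - 2) 0)) (some (min (j + 3) w))).any (fun v => v != 0)
    then 1 else 0)

def computeDilation8Nbh5x5FlatSE_alt (pixel_array : List (List Int)) (image_width : Int) (image_height : Int) : List (List Int) :=
  if image_height < 3 ∨ image_width < 3 then pixel_array else
  let inter := (PySem.List.slice pixel_array none (some image_height)).map
    (fun row => pvHorizRow row image_width)
  let cols := (PySem.List.pyRange 0 image_width 1).map (fun j =>
    inter.map (fun r => (PySem.List.pyGet? r j).getD 0))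
  (PySem.List.pyRange 1 (image_height - 1) 1).foldl (fun image i =>
    (PySem.List.pyRange 1 (image_width - 1) 1).foldl (fun image2 j =>
      pvSet2 image2 i j
        (if (PySem.List.slice ((PySem.List.pyGet? cols j).getD [])
               (some (max (i - 2) 0)) (some (i + 3))).any (fun v => v != 0)
         then 1 else 0)) image) pixel_array

-- ===== PRECONDITION & SPEC =====
-- Pre_ excludes exactly the inputs where A raises IndexError: both dimensions positive
-- but pixel_array has fewer than image_height rows, or one of its first image_height
-- rows is shorter than image_width.
def Pre_computeDilation8Nbh5x5FlatSE (pixel_array : List (List Int)) (image_width : Int) (image_height : Int) : Prop :=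
  0 < image_width → 0 < image_height →
    (image_height ≤ (pixel_array.length : Int) ∧
     ∀ r ∈ pixel_array.take image_height.toNat, image_width ≤ (r.length : Int))
instance (pixel_array : List (List Int)) (image_width : Int) (image_height : Int) : Decidable (Pre_computeDilation8Nbh5x5FlatSE pixel_array image_width image_height) := by unfold Pre_computeDilation8Nbh5x5FlatSE; infer_instance

def pvWitness_computeDilation8Nbh5x5FlatSE : List (List Int) × Int × Int :=
  ([[0, 0, 0], [0, 1, 0], [0, 0, 0]], 3, 3)

def Spec_computeDilation8Nbh5x5FlatSE (pixel_array : List (List Int)) (image_width : Int) (image_height : Int) (out : List (List Int)) : Prop := out = computeDilation8Nbh5x5FlatSE_alt pixel_array image_width image_height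
instance (pixel_array : List (List Int)) (image_width : Int) (image_height : Int) (out : List (List Int)) : Decidable (Spec_computeDilation8Nbh5x5FlatSE pixel_array image_width image_height out) := by unfold Spec_computeDilation8Nbh5x5FlatSE; infer_instance

-- ===== CLAIM (what is proved, stated in full; the proofs are below) =====
def Claim_equal_computeDilation8Nbh5x5FlatSE : Prop := ∀ (pixel_array : List (List Int)) (image_width : Int) (image_height : Int), Dom_computeDilation8Nbh5x5FlatSE pixel_array image_width image_height → Pre_computeDilation8Nbh5x5FlatSE pixel_array image_width image_height → Spec_computeDilation8Nbh5x5FlatSE pixel_array image_width image_height (computeDilation8Nbh5x5FlatSE pixel_array image_width image_height)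

-- ===== LEMMAS AND PROOFS =====

-- rectangular shape
def pvRect (a : List (List Int)) (n m : Nat) : Prop :=
  a.length = n ∧ ∀ r ∈ a, r.length = m

lemma pvRect_createInit (w h v : Int) :
    pvRect (pvCreateInit w h v) (h - 0).toNat (w - 0).toNat := by
  constructor
  · simp [pvCreateInit, PySem.List.length_pyRange_one]
  · intro r hr
    simp only [pvCreateInit, List.mem_map] at hr
    obtain ⟨x, -, rfl⟩ := hr
    simp [PySem.List.length_pyRange_one]

lemma pvGetD_zero_of_allzero (xs : List Int) (c : Int) (hz : ∀ v ∈ xs, v = 0) :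
    (PySem.List.pyGet? xs c).getD 0 = 0 := by
  rcases hg : PySem.List.pyGet? xs c with _ | v
  · rfl
  · exact hz v (PySem.List.mem_of_pyGet?_eq_some _ hg)

lemma pvGet2_createInit_zero (w h r c : Int) :
    pvGet2 (pvCreateInit w h 0) r c = 0 := by
  unfold pvGet2
  rcases h1 : PySem.List.pyGet? (pvCreateInit w h 0) r with _ | row
  · exact pvGetD_zero_of_allzero [] c (by simp)
  · simp only [Option.getD_some]
    apply pvGetD_zero_of_allzero
    have hrow := PySem.List.mem_of_pyGet?_eq_some _ h1
    simp only [pvCreateInit, List.mem_map] at hrow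
    obtain ⟨x, -, rfl⟩ := hrow
    intro v hv
    simp only [List.mem_map] at hv
    obtain ⟨y, -, hy⟩ := hv
    exact hy.symm

lemma pvRect_set2 {a : List (List Int)} {n m : Nat} (h : pvRect a n m) (i j : Int) (v : Int) :
    pvRect (pvSet2 a i j v) n m := by
  obtain ⟨hlen, hrows⟩ := h
  by_cases hi : i.toNat < a.length
  · refine ⟨by simp [pvSet2, hlen], ?_⟩
    intro r hr
    rcases List.mem_or_eq_of_mem_set hr with hmem | rfl
    · exact hrows _ hmem
    · rw [List.length_set]
      exact hrows _ (by rw [List.getD_eq_getElem _ _ hi]; exact List.getElem_mem hi)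
  · unfold pvSet2
    rw [List.set_eq_of_length_le (by omega)]
    exact ⟨hlen, hrows⟩

lemma pvGet2_set2 {a : List (List Int)} {n m : Nat}
    (hR : pvRect a n m)
    (i j r c v : Int) (hi : 0 ≤ i) (hj : 0 ≤ j) (hin : i < (n : Int)) (hjm : j < (m : Int))
    (hr : 0 ≤ r) (hc : 0 ≤ c) :
    pvGet2 (pvSet2 a i j v) r c = if r = i ∧ c = j then v else pvGet2 a r c := by
  obtain ⟨hlen, hrows⟩ := hR
  have hi' : i.toNat < a.length := by omega
  have hrowmem : a.getD i.toNat [] ∈ a := by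
    rw [List.getD_eq_getElem _ _ hi']; exact List.getElem_mem hi'
  have hrlen : (a.getD i.toNat []).length = m := hrows _ hrowmem
  unfold pvGet2 pvSet2
  rw [PySem.List.pyGet?_of_nonneg _ hr, PySem.List.pyGet?_of_nonneg _ hr]
  by_cases hri : r = i
  · subst hri
    rw [List.getElem?_set_self (by omega)]
    simp only [Option.getD_some]
    rw [PySem.List.pyGet?_of_nonneg _ hc, PySem.List.pyGet?_of_nonneg _ hc]
    have hget : a[r.toNat]? = some (a.getD r.toNat []) := by
      rw [List.getD_eq_getElem _ _ hi', List.getElem?_eq_getElem hi']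
    rw [hget]
    simp only [Option.getD_some]
    by_cases hcj : c = j
    · subst hcj
      rw [List.getElem?_set_self (by omega)]
      simp
    · rw [List.getElem?_set_ne (by omega)]
      simp [hcj]
  · rw [List.getElem?_set_ne (by omega)]
    simp [hri]

lemma pvSliceAny (xs : List Int) (a b : Int) (ha : 0 ≤ a) (hb : 0 ≤ b) :
    ((PySem.List.slice xs (some a) (some b)).any (fun v => v != 0) = true ↔
      ∃ m : Int, a ≤ m ∧ m < b ∧ m < (xs.length : Int) ∧ xs.getD m.toNat 0 ≠ 0) := by
  rw [PySem.List.slice_toNat _ ha hb, List.any_eq_true]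
  constructor
  · rintro ⟨x, hx, hxne⟩
    rw [List.mem_iff_getElem] at hx
    obtain ⟨t, ht, hxe⟩ := hx
    have ht' : t < b.toNat - a.toNat ∧ a.toNat + t < xs.length := by
      simp only [List.length_take, List.length_drop] at ht
      omega
    refine ⟨a + t, by omega, by omega, by omega, ?_⟩
    rw [List.getD_eq_getElem _ _ (by omega)]
    have hEq : ((xs.drop a.toNat).take (b.toNat - a.toNat))[t] = xs[a.toNat + t] := by
      rw [List.getElem_take, List.getElem_drop]
    have hnat : (a + (t : Int)).toNat = a.toNat + t := by omega
    simp only [hnat]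
    rw [← hEq, hxe]
    simpa using hxne
  · rintro ⟨m, ham, hmb, hml, hne⟩
    have hm' : m.toNat < xs.length := by omega
    refine ⟨xs[m.toNat], ?_, ?_⟩
    · rw [List.mem_iff_getElem]
      refine ⟨m.toNat - a.toNat, ?_, ?_⟩
      · simp only [List.length_take, List.length_drop]; omega
      · rw [List.getElem_take, List.getElem_drop]
        congr 1; omega
    · rw [List.getD_eq_getElem _ _ hm'] at hne
      simpa using hne

-- one row of ZeroBorder (the inner column loop)
lemma pvZB_col (pa : List (List Int)) (row : Int) {N M : Nat}
    (hN : row + 1 < (N : Int)) (hrow : 0 ≤ row) :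
    ∀ (t : Nat) (acc : List (List Int)), pvRect acc N M → (t : Int) < (M : Int) →
      pvRect ((PySem.List.pyRange 0 (t : Int) 1).foldl
        (fun acc2 col => pvSet2 acc2 (row + 1) (col + 1) (pvGet2 pa row col)) acc) N M ∧
      ∀ r c : Int, 0 ≤ r → 0 ≤ c →
        pvGet2 ((PySem.List.pyRange 0 (t : Int) 1).foldl
          (fun acc2 col => pvSet2 acc2 (row + 1) (col + 1) (pvGet2 pa row col)) acc) r c
          = if r = row + 1 ∧ 1 ≤ c ∧ c ≤ (t : Int) then pvGet2 pa row (c - 1)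
            else pvGet2 acc r c := by
  intro t
  induction t with
  | zero =>
    intro acc hacc _
    rw [PySem.List.pyRange_one_eq_nil (by norm_num)]
    refine ⟨hacc, ?_⟩
    intro r c hr hc
    rw [List.foldl_nil, if_neg (by omega)]
  | succ t ih =>
    intro acc hacc htM
    have htM' : (t : Int) < (M : Int) := by push_cast at htM ⊢; omega
    obtain ⟨ihR, ihG⟩ := ih acc hacc htM'
    have hsplit : PySem.List.pyRange 0 ((t : Nat) + 1 : Int) 1
        = PySem.List.pyRange 0 (t : Int) 1 ++ [(t : Int)] := by
      exact PySem.List.pyRange_one_succ_right (by positivity)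
    rw [show (((t + 1 : Nat) : Int)) = ((t : Int) + 1) by push_cast; ring, hsplit,
      List.foldl_append, List.foldl_cons, List.foldl_nil]
    refine ⟨pvRect_set2 ihR _ _ _, ?_⟩
    intro r c hr hc
    rw [pvGet2_set2 ihR (row + 1) ((t : Int) + 1) r c _ (by omega) (by omega) hN
      (by push_cast at htM ⊢; omega) hr hc]
    by_cases h1 : r = row + 1 ∧ c = (t : Int) + 1
    · rw [if_pos h1, if_pos (by omega)]
      rw [show c - 1 = ((t : Nat) : Int) by omega]
    · rw [if_neg h1, ihG r c hr hc]
      by_cases h2 : r = row + 1 ∧ 1 ≤ c ∧ c ≤ (t : Int)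
      · rw [if_pos h2, if_pos (by omega)]
      · rw [if_neg h2, if_neg (by omega)]

-- the outer row loop of ZeroBorder over the zero temp array
lemma pvZB_row (pa : List (List Int)) (w : Int) (hw : 0 < w) {N M : Nat}
    (hM : w < (M : Int)) (temp : List (List Int)) (hRect : pvRect temp N M)
    (htz : ∀ r c : Int, pvGet2 temp r c = 0) :
    ∀ (t : Nat), (t : Int) < (N : Int) →
      pvRect ((PySem.List.pyRange 0 (t : Int) 1).foldl
        (fun acc row => (PySem.List.pyRange 0 w 1).foldl
          (fun acc2 col => pvSet2 acc2 (row + 1) (col + 1) (pvGet2 pa row col)) acc) temp) N M ∧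
      ∀ r c : Int, 0 ≤ r → 0 ≤ c →
        pvGet2 ((PySem.List.pyRange 0 (t : Int) 1).foldl
          (fun acc row => (PySem.List.pyRange 0 w 1).foldl
            (fun acc2 col => pvSet2 acc2 (row + 1) (col + 1) (pvGet2 pa row col)) acc) temp) r c
          = if 1 ≤ r ∧ r ≤ (t : Int) ∧ 1 ≤ c ∧ c ≤ w then pvGet2 pa (r - 1) (c - 1) else 0 := by
  intro t
  induction t with
  | zero =>
    intro _
    have h0 : PySem.List.pyRange 0 (((0 : Nat) : Int)) 1 = [] :=
      PySem.List.pyRange_one_eq_nil (by norm_num)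
    rw [h0]
    refine ⟨hRect, ?_⟩
    intro r c hr hc
    rw [List.foldl_nil, if_neg (by omega), htz]
  | succ t ih =>
    intro htN
    have htN' : (t : Int) < (N : Int) := by push_cast at htN ⊢; omega
    obtain ⟨ihR, ihG⟩ := ih htN'
    have hsplit : PySem.List.pyRange 0 ((t : Nat) + 1 : Int) 1
        = PySem.List.pyRange 0 (t : Int) 1 ++ [(t : Int)] := by
      exact PySem.List.pyRange_one_succ_right (by positivity)
    rw [show (((t + 1 : Nat) : Int)) = ((t : Int) + 1) by push_cast; ring, hsplit,
      List.foldl_append, List.foldl_cons, List.foldl_nil]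
    have hwcast : w = ((w.toNat : Nat) : Int) := by omega
    have hcol := pvZB_col pa (t : Int) (N := N) (M := M)
      (by push_cast at htN ⊢; omega) (by positivity) w.toNat _ ihR (by omega)
    rw [← hwcast] at hcol
    obtain ⟨hcR, hcG⟩ := hcol
    refine ⟨hcR, ?_⟩
    intro r c hr hc
    rw [hcG r c hr hc]
    by_cases h1 : r = (t : Int) + 1 ∧ 1 ≤ c ∧ c ≤ w
    · rw [if_pos h1, if_pos (by omega)]
      rw [show ((t : Nat) : Int) = r - 1 by omega]
    · rw [if_neg h1, ihG r c hr hc]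
      by_cases h2 : 1 ≤ r ∧ r ≤ (t : Int) ∧ 1 ≤ c ∧ c ≤ w
      · rw [if_pos h2, if_pos (by omega)]
      · rw [if_neg h2, if_neg (by omega)]

-- the net effect of ZeroBorder: a zero frame around the first h×w block of pa
lemma pvZeroBorder_get (pa : List (List Int)) (w h : Int) (hw : 0 < w) (hh : 0 < h)
    (r c : Int) (hr : 0 ≤ r) (hc : 0 ≤ c) :
    pvGet2 (pvZeroBorder pa (pvCreateInit (w + 2) (h + 2) 0) w h) r c
      = if 1 ≤ r ∧ r ≤ h ∧ 1 ≤ c ∧ c ≤ w then pvGet2 pa (r - 1) (c - 1) else 0 := by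
  have hRect := pvRect_createInit (w + 2) (h + 2) 0
  have hzero : ∀ r c : Int, pvGet2 (pvCreateInit (w + 2) (h + 2) 0) r c = 0 :=
    fun r c => pvGet2_createInit_zero _ _ _ _
  have hrow := pvZB_row pa w hw (N := (h + 2 - 0).toNat) (M := (w + 2 - 0).toNat)
    (by omega) _ hRect hzero h.toNat (by omega)
  have hcast : ((h.toNat : Nat) : Int) = h := by omega
  rw [hcast] at hrow
  rw [pvZeroBorder, hrow.2 r c hr hc]

lemma pvIfCongr {c d : Bool} (h : c = true ↔ d = true) :
    (if c then (1 : Int) else 0) = if d then 1 else 0 := by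
  cases c <;> cases d <;> simp_all

-- reading the horizontal-pass intermediate at (k, j)
lemma pvInter_get (pa : List (List Int)) (w h : Int) (hh : 0 < h)
    (hlen : h ≤ (pa.length : Int)) (k j : Int) (hk : 0 ≤ k) (hkh : k < h)
    (hj : 0 ≤ j) (hjw : j < w) :
    pvGet2 ((PySem.List.slice pa none (some h)).map (fun row => pvHorizRow row w)) k j
      = if (PySem.List.slice (pa.getD k.toNat []) (some (max (j - 2) 0))
             (some (min (j + 3) w))).any (fun v => v != 0)
        then 1 else 0 := by
  have hk'' : k.toNat < pa.length := by omega
  have hk' : k.toNat < (pa.take h.toNat).length := by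
    simp only [List.length_take]; omega
  unfold pvGet2
  rw [PySem.List.slice_to _ (by omega)]
  rw [PySem.List.pyGet?_of_nonneg _ hk]
  rw [List.getElem?_map, List.getElem?_eq_getElem hk']
  simp only [Option.map_some, Option.getD_some, List.getElem_take]
  unfold pvHorizRow
  have hj' : j.toNat < (PySem.List.pyRange 0 w 1).length := by
    rw [PySem.List.length_pyRange_one]; omega
  rw [PySem.List.pyGet?_of_nonneg _ hj, List.getElem?_map, List.getElem?_eq_getElem hj']
  simp only [Option.map_some, Option.getD_some]
  rw [PySem.List.getElem_pyRange_one]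
  rw [List.getD_eq_getElem _ _ hk'']
  rw [show ((0 : Int) + (j.toNat : Int)) = j by omega]

-- reading the transposed intermediate column j
lemma pvCols_get (inter : List (List Int)) (w j : Int) (hj : 0 ≤ j) (hjw : j < w) :
    (PySem.List.pyGet? ((PySem.List.pyRange 0 w 1).map (fun j =>
        inter.map (fun r => (PySem.List.pyGet? r j).getD 0))) j).getD []
      = inter.map (fun r => (PySem.List.pyGet? r j).getD 0) := by
  have hj' : j.toNat < (PySem.List.pyRange 0 w 1).length := by
    rw [PySem.List.length_pyRange_one]; omega
  rw [PySem.List.pyGet?_of_nonneg _ hj, List.getElem?_map, List.getElem?_eq_getElem hj']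
  simp only [Option.map_some, Option.getD_some]
  rw [PySem.List.getElem_pyRange_one]
  rw [show ((0 : Int) + (j.toNat : Int)) = j by omega]

-- the per-pixel value equality inside the interior
lemma pvValue_eq (pa : List (List Int)) (w h : Int) (hw : 3 ≤ w) (hh : 3 ≤ h)
    (hlen : h ≤ (pa.length : Int))
    (i j : Int) (hi : 1 ≤ i) (hih : i < h - 1) (hj : 1 ≤ j) (hjw : j < w - 1) :
    pvCheckDilation (pvZeroBorder pa (pvCreateInit (w + 2) (h + 2) 0) w h) i j
      = (if (PySem.List.slice ((PySem.List.pyGet?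
              ((PySem.List.pyRange 0 w 1).map (fun j =>
                ((PySem.List.slice pa none (some h)).map (fun row => pvHorizRow row w)).map
                  (fun r => (PySem.List.pyGet? r j).getD 0))) j).getD [])
            (some (max (i - 2) 0)) (some (i + 3))).any (fun v => v != 0)
         then 1 else 0) := by
  set inter := (PySem.List.slice pa none (some h)).map (fun row => pvHorizRow row w) with hinter
  rw [pvCols_get inter w j (by omega) (by omega)]
  unfold pvCheckDilation
  have hinterlen : (inter.length : Int) = h := by
    rw [hinter]
    simp only [List.length_map]
    rw [PySem.List.slice_to _ (by omega)]
    simp only [List.length_take]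
    omega
  apply pvIfCongr
  constructor
  · intro hA
    rw [List.any_eq_true] at hA
    obtain ⟨x, hxmem, hA⟩ := hA
    rw [List.any_eq_true] at hA
    obtain ⟨y, hymem, hA⟩ := hA
    rw [PySem.List.mem_pyRange_one] at hxmem hymem
    rw [bne_iff_ne] at hA
    rw [pvZeroBorder_get pa w h (by omega) (by omega) _ _ (by omega) (by omega)] at hA
    by_cases hbnd : 1 ≤ i + x + 1 ∧ i + x + 1 ≤ h ∧ 1 ≤ j + y + 1 ∧ j + y + 1 ≤ w
    · rw [if_pos hbnd] at hA
      rw [show i + x + 1 - 1 = i + x by ring, show j + y + 1 - 1 = j + y by ring] at hA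
      have hkr : (i + x).toNat < pa.length := by omega
      -- the witness row index is k := i + x, column m := j + y
      rw [pvSliceAny _ _ _ (by omega) (by omega)]
      have hki : (i + x).toNat < inter.length := by omega
      have hmap : (inter.map (fun r => (PySem.List.pyGet? r j).getD 0)).getD (i + x).toNat 0
          = pvGet2 inter (i + x) j := by
        rw [List.getD_eq_getElem _ _ (by simpa using hki), List.getElem_map]
        unfold pvGet2
        rw [PySem.List.pyGet?_of_nonneg inter (by omega : (0 : Int) ≤ i + x),
          List.getElem?_eq_getElem hki]
        simp
      refine ⟨i + x, by omega, by omega, by rw [List.length_map]; omega, ?_⟩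
      rw [hmap,
        pvInter_get pa w h (by omega) hlen (i + x) j (by omega) (by omega) (by omega) (by omega)]
      have hany : (PySem.List.slice (pa.getD (i + x).toNat []) (some (max (j - 2) 0))
          (some (min (j + 3) w))).any (fun v => v != 0) = true := by
        rw [pvSliceAny _ _ _ (by omega) (by omega)]
        refine ⟨j + y, by omega, by omega, ?_, ?_⟩
        · -- pvGet2 pa (i+x) (j+y) ≠ 0 forces j + y inside the row
          by_contra hcon
          rw [not_lt] at hcon
          apply hA
          unfold pvGet2
          rw [PySem.List.pyGet?_of_nonneg pa (by omega : (0 : Int) ≤ i + x),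
            List.getElem?_eq_getElem hkr]
          simp only [Option.getD_some]
          rw [PySem.List.pyGet?_of_nonneg _ (by omega : (0 : Int) ≤ j + y),
            List.getElem?_eq_none (by rw [List.getD_eq_getElem _ _ hkr] at hcon; omega)]
          rfl
        · -- the value at the witness cell
          rw [List.getD_eq_getElem _ _ hkr]
          intro h0
          apply hA
          unfold pvGet2
          rw [PySem.List.pyGet?_of_nonneg pa (by omega : (0 : Int) ≤ i + x),
            List.getElem?_eq_getElem hkr]
          simp only [Option.getD_some]
          rw [PySem.List.pyGet?_of_nonneg _ (by omega : (0 : Int) ≤ j + y)]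
          rw [List.getD_eq_getElem?_getD] at h0
          exact h0
      rw [if_pos hany]
      norm_num
    · rw [if_neg hbnd] at hA
      exact absurd rfl hA
  · intro hB
    rw [pvSliceAny _ _ _ (by omega) (by omega)] at hB
    obtain ⟨k, hk1, hk2, hk3, hkv⟩ := hB
    rw [List.length_map] at hk3
    have hki : k.toNat < inter.length := by omega
    have hkr : k.toNat < pa.length := by omega
    have hmap : (inter.map (fun r => (PySem.List.pyGet? r j).getD 0)).getD k.toNat 0
        = pvGet2 inter k j := by
      rw [List.getD_eq_getElem _ _ (by simpa using hki), List.getElem_map]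
      unfold pvGet2
      rw [PySem.List.pyGet?_of_nonneg inter (by omega : (0 : Int) ≤ k),
        List.getElem?_eq_getElem hki]
      simp
    rw [hmap,
      pvInter_get pa w h (by omega) hlen k j (by omega) (by omega) (by omega) (by omega)] at hkv
    by_cases hin : (PySem.List.slice (pa.getD k.toNat []) (some (max (j - 2) 0))
        (some (min (j + 3) w))).any (fun v => v != 0) = true
    · rw [pvSliceAny _ _ _ (by omega) (by omega)] at hin
      obtain ⟨m, hm1, hm2, hm3, hmv⟩ := hin
      rw [List.getD_eq_getElem _ _ hkr] at hmv hm3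
      rw [List.any_eq_true]
      refine ⟨k - i, ?_, ?_⟩
      · rw [PySem.List.mem_pyRange_one]; omega
      · rw [List.any_eq_true]
        refine ⟨m - j, ?_, ?_⟩
        · rw [PySem.List.mem_pyRange_one]; omega
        · rw [bne_iff_ne,
            pvZeroBorder_get pa w h (by omega) (by omega) _ _ (by omega) (by omega),
            if_pos (by omega)]
          rw [show i + (k - i) + 1 - 1 = k by ring, show j + (m - j) + 1 - 1 = m by ring]
          unfold pvGet2
          rw [PySem.List.pyGet?_of_nonneg pa (by omega : (0 : Int) ≤ k),
            List.getElem?_eq_getElem hkr]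
          simp only [Option.getD_some]
          rw [PySem.List.pyGet?_of_nonneg _ (by omega : (0 : Int) ≤ m),
            List.getElem?_eq_getElem (by omega : m.toNat < pa[k.toNat].length)]
          simp only [Option.getD_some]
          rw [List.getD_eq_getElem _ _ (by omega : m.toNat < pa[k.toNat].length)] at hmv
          exact hmv
    · rw [if_neg hin] at hkv
      exact absurd rfl hkv

-- ===== VERDICT (by name: the statement is the Claim_ definition above) =====
theorem computeDilation8Nbh5x5FlatSE_spec : Claim_equal_computeDilation8Nbh5x5FlatSE := by
  intro pa w h hDom hPre
  unfold Spec_computeDilation8Nbh5x5FlatSE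
  simp only [computeDilation8Nbh5x5FlatSE, computeDilation8Nbh5x5FlatSE_alt]
  by_cases hg : h < 3 ∨ w < 3
  · rw [if_pos hg]
    rcases hg with hg | hg
    · simp only [PySem.List.pyRange_one_eq_nil (by omega : h - 1 ≤ 1), List.foldl_nil]
    · simp only [PySem.List.pyRange_one_eq_nil (by omega : w - 1 ≤ 1), List.foldl_nil,
        PySem.List.foldl_ignore]
  · rw [if_neg hg]
    obtain ⟨hlen, -⟩ := hPre (by omega) (by omega)
    apply PySem.List.foldl_congr_mem
    intro acc i hi
    apply PySem.List.foldl_congr_mem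
    intro acc2 j hj
    rw [PySem.List.mem_pyRange_one] at hi hj
    congr 1
    exact pvValue_eq pa w h (by omega) (by omega) hlen i j
      (by omega) (by omega) (by omega) (by omega)
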